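-- pv_equiv track=rewrite | github.com/NextCenturyCorporation/mcs-scene-generator | hypercube/agent_scene_pair_json_converter.py | _create_action_list
-- ===== SOURCE A (Python) =====
-- from typing import Any, Callable, Dict, List, Optional, Tuple
--
-- def _create_action_list(
--     trial_list: List[List[Dict[str, Any]]]
-- ) -> List[List[str]]:
--     """Create and return the MCS scene's action list using the given trial
--     list from the JSON file data."""
--     action_list = []
--     for index in range(0, len(trial_list)):
--         # Add 1 for the EndHabituation action step at the end of the trial.
--         total_steps = len(trial_list[index]) + 1
--         action_list.extend([['Pass']] * (total_steps - 1))
--         action_list.append(['EndHabituation'])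
--     # Remove the EndHabituation action from the last test trial.
--     return action_list[:-1]
-- ===== SOURCE B (Python) =====
-- from typing import Any, Dict, List
--
--
-- def _create_action_list(
--     trial_list: List[List[Dict[str, Any]]]
-- ) -> List[List[str]]:
--     """Create and return the MCS scene's action list using the given trial
--     list from the JSON file data."""
--     # Preallocate the whole list as Pass steps (closed-form length), then
--     # overwrite the separator slot after each non-final trial in place.
--     total = sum(len(trial) for trial in trial_list) + max(len(trial_list) - 1, 0)
--     action_list = [['Pass']] * total
--     pos = -1
--     for trial in trial_list[:-1]:
--         pos += len(trial) + 1
--         action_list[pos] = ['EndHabituation']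
--     return action_list
-- ===== Notes on version B (the rewrite author's own statement) =====
-- stated objective: alternative
-- what changed: B preallocates a Pass list of the closed-form total length (sum of trial lengths plus one separator per gap) and then overwrites the computed separator positions in place, instead of growing the list trial by trial with an extra separator and trimming the trailing one with [:-1].
import Mathlib
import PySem

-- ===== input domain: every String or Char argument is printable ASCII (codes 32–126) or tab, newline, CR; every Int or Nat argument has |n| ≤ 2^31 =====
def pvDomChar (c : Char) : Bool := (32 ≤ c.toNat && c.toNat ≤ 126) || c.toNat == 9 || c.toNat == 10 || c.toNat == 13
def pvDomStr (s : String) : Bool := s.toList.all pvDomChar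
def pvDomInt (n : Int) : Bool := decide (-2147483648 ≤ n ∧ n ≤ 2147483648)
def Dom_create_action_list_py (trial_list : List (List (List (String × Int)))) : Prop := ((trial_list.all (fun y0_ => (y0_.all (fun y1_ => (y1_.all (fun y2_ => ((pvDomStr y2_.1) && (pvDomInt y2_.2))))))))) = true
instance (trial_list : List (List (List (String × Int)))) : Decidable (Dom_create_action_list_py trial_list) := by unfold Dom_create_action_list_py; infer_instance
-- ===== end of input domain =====

-- B preallocates a Pass list of the closed-form total length and overwrites the separator
-- positions in place, instead of A's grow-then-trim loop (alternative decomposition, same cost).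

-- ===== PORT A =====
-- for index in range(0, len(trial_list)): extend [['Pass']]*(total_steps-1); append ['EndHabituation']; return action_list[:-1]
def create_action_list_py (trial_list : List (List (List (String × Int)))) : List (List String) :=
  let action_list : List (List String) :=
    (PySem.List.pyRange 0 trial_list.length 1).foldl
      (fun acc index =>
        let total_steps : Int := (PySem.List.pyGetD trial_list index []).length + 1
        (acc ++ List.replicate (total_steps - 1).toNat ["Pass"]) ++ [["EndHabituation"]])
      []
  PySem.List.slice action_list none (some (-1))

-- ===== PORT B =====
-- total = sum(len(trial)…) + max(len(trial_list)-1, 0); action_list = [['Pass']]*total;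
-- for trial in trial_list[:-1]: pos += len(trial)+1; action_list[pos] = ['EndHabituation']
-- ('action_list[pos] = v' is ported as List.set: pos is always a nonnegative in-range index here, exact)
def create_action_list_py_alt (trial_list : List (List (List (String × Int)))) : List (List String) :=
  let total : Int :=
    (trial_list.foldl (fun s t => s + (t.length : Int)) 0) + max ((trial_list.length : Int) - 1) 0
  let init : List (List String) := List.replicate total.toNat ["Pass"]
  ((PySem.List.slice trial_list none (some (-1))).foldl
    (fun (st : List (List String) × Int) trial =>
      let pos : Int := st.2 + (trial.length : Int) + 1
      (st.1.set pos.toNat ["EndHabituation"], pos))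
    (init, -1)).1

-- ===== PRECONDITION & SPEC =====
def Spec_create_action_list_py (trial_list : List (List (List (String × Int)))) (out : List (List String)) : Prop := out = create_action_list_py_alt trial_list
instance (trial_list : List (List (List (String × Int)))) (out : List (List String)) : Decidable (Spec_create_action_list_py trial_list out) := by unfold Spec_create_action_list_py; infer_instance

-- ===== CLAIM (what is proved, stated in full; the proofs are below) =====
def Claim_equal_create_action_list_py : Prop := ∀ (trial_list : List (List (List (String × Int)))), Dom_create_action_list_py trial_list → Spec_create_action_list_py trial_list (create_action_list_py trial_list)

-- ===== LEMMAS AND PROOFS =====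

-- Canonical value: Pass-blocks each followed by a separator, with the trailing separator dropped.
def pvJoin (tl : List (List (List (String × Int)))) : List (List String) :=
  ((tl.map (fun t => List.replicate t.length (["Pass"] : List String) ++ [["EndHabituation"]])).flatten).dropLast

-- Total output length (Nat): sum of trial lengths plus one separator per gap.
def pvTotal (tl : List (List (List (String × Int)))) : Nat :=
  (tl.map List.length).sum + tl.length - 1

theorem slice_neg_one {α : Type} (xs : List α) :
    PySem.List.slice xs none (some (-1)) = xs.dropLast := by
  simp [PySem.List.slice, ← List.dropLast_eq_take]

-- A's loop, re-read as a foldl directly over the trials.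
theorem aLoop_eq (tl : List (List (List (String × Int)))) :
    (PySem.List.pyRange 0 tl.length 1).foldl
      (fun acc index =>
        (acc ++ List.replicate (((PySem.List.pyGetD tl index []).length + 1 - 1 : Int)).toNat ["Pass"])
          ++ [["EndHabituation"]])
      [] =
    tl.foldl (fun acc t => acc ++ List.replicate t.length ["Pass"] ++ [["EndHabituation"]]) [] := by
  have h := PySem.List.foldl_pyRange_zero_pyGetD tl []
    (fun (acc : List (List String)) (t : List (List (String × Int))) =>
      (acc ++ List.replicate ((t.length + 1 - 1 : Int)).toNat ["Pass"]) ++ [["EndHabituation"]]) []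
  simpa using h

-- A's fold, flattened.
theorem aFold_flat (tl : List (List (List (String × Int)))) :
    tl.foldl (fun acc t => acc ++ List.replicate t.length ["Pass"] ++ [["EndHabituation"]]) [] =
    (tl.map (fun t => List.replicate t.length ["Pass"] ++ [["EndHabituation"]])).flatten := by
  induction tl using List.reverseRecOn with
  | nil => rfl
  | append_singleton ts t ih => simp

theorem aVal (tl : List (List (List (String × Int)))) :
    create_action_list_py tl = pvJoin tl := by
  unfold create_action_list_py
  rw [slice_neg_one, aLoop_eq, aFold_flat]; rfl

-- Setting the element right after a prefix.
theorem set_after {α : Type} (L : List α) (a v : α) (R : List α) :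
    (L ++ a :: R).set L.length v = L ++ v :: R := by
  induction L with
  | nil => rfl
  | cons x xs ih => simp [ih]

-- pvJoin unfolding on a cons with nonempty tail.
theorem pvJoin_cons (t t2 : List (List (String × Int))) (ts : List (List (List (String × Int)))) :
    pvJoin (t :: t2 :: ts) =
    List.replicate t.length ["Pass"] ++ [["EndHabituation"]] ++ pvJoin (t2 :: ts) := by
  have hne : ((t2 :: ts).map (fun t => List.replicate t.length (["Pass"] : List String) ++ [["EndHabituation"]])).flatten ≠ [] := by
    simp only [List.map_cons, List.flatten_cons]
    exact List.append_ne_nil_of_left_ne_nil (by simp) _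
  unfold pvJoin
  rw [List.map_cons, List.flatten_cons, List.dropLast_append_of_ne_nil hne, List.append_assoc]

-- pvTotal unfolding on a cons with nonempty tail.
theorem pvTotal_cons (t t2 : List (List (String × Int))) (ts : List (List (List (String × Int)))) :
    pvTotal (t :: t2 :: ts) = t.length + 1 + pvTotal (t2 :: ts) := by
  unfold pvTotal; simp [List.sum_cons]; omega

-- B's patch loop invariant: starting from P ++ fresh Pass slots with pos = |P| - 1,
-- the loop turns the fresh region into the joined form for the remaining trials.
theorem patch (ts : List (List (List (String × Int)))) :
    ∀ (P : List (List String)),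
    ((ts.dropLast).foldl
      (fun (st : List (List String) × Int) trial =>
        let pos : Int := st.2 + (trial.length : Int) + 1
        (st.1.set pos.toNat ["EndHabituation"], pos))
      (P ++ List.replicate (pvTotal ts) ["Pass"], (P.length : Int) - 1)).1
    = P ++ pvJoin ts := by
  induction ts with
  | nil => intro P; simp [pvTotal, pvJoin]
  | cons t ts ih =>
      intro P
      cases ts with
      | nil => simp [pvTotal, pvJoin]
      | cons t2 ts2 =>
          have hdl : (t :: t2 :: ts2).dropLast = t :: (t2 :: ts2).dropLast := rfl
          rw [hdl, List.foldl_cons]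
          have hpos : (((P.length : Int) - 1) + (t.length : Int) + 1).toNat
              = (P ++ List.replicate t.length (["Pass"] : List String)).length := by
            simp; omega
          rw [pvTotal_cons]
          have hsplit : P ++ List.replicate (t.length + 1 + pvTotal (t2 :: ts2)) (["Pass"] : List String)
              = (P ++ List.replicate t.length ["Pass"]) ++ (["Pass"] : List String)
                :: List.replicate (pvTotal (t2 :: ts2)) ["Pass"] := by
            rw [show t.length + 1 + pvTotal (t2 :: ts2) = t.length + (1 + pvTotal (t2 :: ts2)) by omega,
              List.replicate_add, List.replicate_add]
            simp
          simp only []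
          rw [hsplit, hpos, set_after]
          have hP' := ih (P ++ List.replicate t.length ["Pass"] ++ [["EndHabituation"]])
          have hlen : ((P ++ List.replicate t.length (["Pass"] : List String) ++ [["EndHabituation"]]).length : Int) - 1
              = ((P.length : Int) - 1) + (t.length : Int) + 1 := by simp; omega
          rw [← hlen]
          have harr : (P ++ List.replicate t.length (["Pass"] : List String)) ++ ["EndHabituation"]
                :: List.replicate (pvTotal (t2 :: ts2)) ["Pass"]
              = (P ++ List.replicate t.length ["Pass"] ++ [["EndHabituation"]])
                ++ List.replicate (pvTotal (t2 :: ts2)) ["Pass"] := by simp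
          rw [harr, hP', pvJoin_cons]
          simp

-- B's Int total matches pvTotal.
theorem total_toNat (tl : List (List (List (String × Int)))) :
    ((tl.foldl (fun s t => s + (t.length : Int)) 0) + max ((tl.length : Int) - 1) 0).toNat
    = pvTotal tl := by
  have hsum : tl.foldl (fun s t => s + (t.length : Int)) 0 = ((tl.map List.length).sum : Nat) := by
    induction tl using List.reverseRecOn with
    | nil => rfl
    | append_singleton ts t ih => simp [ih]
  rw [hsum]
  unfold pvTotal
  cases tl with
  | nil => simp
  | cons t ts =>
      simp only [List.length_cons]
      generalize ((t :: ts).map List.length).sum = S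
      omega

theorem bVal (tl : List (List (List (String × Int)))) :
    create_action_list_py_alt tl = pvJoin tl := by
  unfold create_action_list_py_alt
  simp only [slice_neg_one, total_toNat]
  have h := patch tl []
  simpa using h

-- ===== VERDICT (by name: the statement is the Claim_ definition above) =====
theorem create_action_list_py_spec : Claim_equal_create_action_list_py := by
  intro tl _
  unfold Spec_create_action_list_py
  rw [aVal, bVal]
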